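-- pv_equiv track=rewrite | github.com/amir-daneshmand/Codes | Amir37_Memoization_WordBank.py | all_construct
-- ===== SOURCE A (Python) =====
-- def all_construct(target, word_bank):
--     if target == "":
--         return [[]]
--     result = []
--     for word in word_bank:
--         try:
--             idx = target.index(word)
--         except:
--             idx = None
--         if idx == 0:
--             suffix = target[len(word):]
--             res = all_construct(suffix, word_bank)
--             for i in res:
--                 result.append([word] + i)
--
--     return result
-- ===== SOURCE B (Python) =====
-- def all_construct(target, word_bank):
--     # Bottom-up DP over suffix start positions: table[i] = all ways to build target[i:].
--     n = len(target)
--     table = [None] * (n + 1)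
--     table[n] = [[]]
--     for i in range(n - 1, -1, -1):
--         table[i] = [[w] + rest
--                     for w in word_bank
--                     if target.startswith(w, i)
--                     for rest in table[i + len(w)]]
--     return table[0]
-- ===== Notes on version B (the rewrite author's own statement) =====
-- stated objective: alternative
-- what changed: Replaces A's top-down recursion over suffixes (recomputing each suffix's result repeatedly) with a bottom-up dynamic-programming table indexed by suffix start position, each entry built exactly once; on inputs with many decompositions the output itself is exponential, so neither is measurably faster overall.
import Mathlib
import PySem

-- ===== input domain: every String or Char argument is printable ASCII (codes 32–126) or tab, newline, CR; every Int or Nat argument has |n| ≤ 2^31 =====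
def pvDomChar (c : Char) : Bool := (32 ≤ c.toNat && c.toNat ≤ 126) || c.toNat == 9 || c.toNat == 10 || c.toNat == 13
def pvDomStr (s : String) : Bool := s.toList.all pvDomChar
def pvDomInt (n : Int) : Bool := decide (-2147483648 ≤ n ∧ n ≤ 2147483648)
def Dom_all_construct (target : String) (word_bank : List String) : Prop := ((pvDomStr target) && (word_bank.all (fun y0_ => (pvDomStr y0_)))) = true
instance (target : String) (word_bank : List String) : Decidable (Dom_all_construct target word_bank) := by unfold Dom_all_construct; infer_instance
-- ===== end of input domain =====

-- B replaces A's top-down recursion over suffixes with a bottom-up DP table over suffix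
-- start positions, each table entry built once (alternative algorithm, same results).

-- ===== PORT A =====
-- Literal port of A's recursion, on target.toList. 'target.index(word)' compared to 0
-- is PySem.Chars.find … = 0; the try/except only turns the exception into idx=None,
-- which also fails the '== 0' test, so the find = 0 test is exact. The dite guard only
-- establishes termination: it fails exactly when word = "" matches, where Python A
-- recurses forever (RecursionError) — those inputs are excluded by Pre_.
mutual
def allConstructA (bank : List String) (t : List Char) : List (List String) :=
  if t = [] then [[]]
  else allConstructALoop bank bank t
termination_by (t.length, bank.length + 1)
def allConstructALoop (bank : List String) (words : List String) (t : List Char) : List (List String) :=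
  match words with
  | [] => []
  | w :: rest =>
    (if PySem.Chars.find t w.toList = 0 then
       -- suffix = target[len(word):]  (slice s[k:] with k = len(word) ≥ 0 is drop)
       if h : (t.drop w.toList.length).length < t.length then
         (allConstructA bank (t.drop w.toList.length)).map (fun i => w :: i)
       else []
     else []) ++ allConstructALoop bank rest t
termination_by (t.length, words.length)
decreasing_by
  · simp only [List.length_drop] at h ⊢
    exact Prod.Lex.left _ _ h
  · exact Prod.Lex.right _ (by simp)
end

def all_construct (target : String) (word_bank : List String) : List (List String) :=
  allConstructA word_bank target.toList

-- ===== PORT B =====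
-- B (Source B): table[i] = all ways to build target[i:], built bottom-up. Here the table for
-- suffix t is a list whose entry k is table for t.drop k; bStep builds one new entry from
-- the already-built entries acc (acc[j] = table for t.drop (j+1)), reading
-- acc[len(w)-1] = table[i+len(w)] exactly as Source B's comprehension does. (For w = ""
-- Source B hits the uninitialised table[i] and raises TypeError; excluded by Pre_.)
def bStep (bank : List String) (t : List Char) (acc : List (List (List String))) : List (List String) :=
  bank.flatMap (fun w =>
    if w.toList.isPrefixOf t then      -- target.startswith(w, i)
      match acc[w.toList.length - 1]? with
      | some r => r.map (fun rest => w :: rest)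
      | none => []
    else [])

def bTables (bank : List String) : List Char → List (List (List String))
  | [] => [[[]]]
  | c :: rest =>
    let acc := bTables bank rest
    bStep bank (c :: rest) acc :: acc

def all_construct_alt (target : String) (word_bank : List String) : List (List String) :=
  (bTables word_bank target.toList).headD []    -- return table[0]

-- ===== PRECONDITION & SPEC =====
-- Pre_ excludes the inputs where Python A raises (RecursionError: an empty word in the
-- bank matches at index 0 forever once target is nonempty; Python B raises TypeError there too).
def Pre_all_construct (target : String) (word_bank : List String) : Prop :=
  target = "" ∨ "" ∉ word_bank
instance (target : String) (word_bank : List String) : Decidable (Pre_all_construct target word_bank) := by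
  unfold Pre_all_construct; infer_instance

def pvWitness_all_construct : String × List String := ("abcd", ["a", "bc", "ab", "cd", "d", "abc"])

def Spec_all_construct (target : String) (word_bank : List String) (out : List (List String)) : Prop := out = all_construct_alt target word_bank
instance (target : String) (word_bank : List String) (out : List (List String)) : Decidable (Spec_all_construct target word_bank out) := by unfold Spec_all_construct; infer_instance

-- ===== CLAIM (what is proved, stated in full; the proofs are below) =====
def Claim_equal_all_construct : Prop := ∀ (target : String) (word_bank : List String), Dom_all_construct target word_bank → Pre_all_construct target word_bank → Spec_all_construct target word_bank (all_construct target word_bank)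

-- ===== LEMMAS AND PROOFS =====

-- equation lemmas for the well-founded mutual recursion of port A
theorem allConstructA_nil (bank : List String) : allConstructA bank [] = [[]] := by
  unfold allConstructA; simp

theorem allConstructA_cons (bank : List String) (c : Char) (r : List Char) :
    allConstructA bank (c :: r) = allConstructALoop bank bank (c :: r) := by
  unfold allConstructA; simp

theorem allConstructALoop_nil (bank : List String) (t : List Char) :
    allConstructALoop bank [] t = [] := by
  unfold allConstructALoop; rfl

theorem allConstructALoop_cons (bank : List String) (w : String) (ws : List String) (t : List Char) :
    allConstructALoop bank (w :: ws) t =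
      (if PySem.Chars.find t w.toList = 0 then
         if h : (t.drop w.toList.length).length < t.length then
           (allConstructA bank (t.drop w.toList.length)).map (fun i => w :: i)
         else []
       else []) ++ allConstructALoop bank ws t := by
  conv_lhs => rw [allConstructALoop.eq_def]

-- find t w = 0 iff w is a prefix of t (Python: target.index(word) == 0 ⟺ startswith)
theorem find_eq_zero_iff (t w : List Char) : PySem.Chars.find t w = 0 ↔ w <+: t := by
  constructor
  · intro h
    have h0 : (0 : Int) ≤ PySem.Chars.find t w := by omega
    have := (PySem.Chars.find_spec (s := t) (sub := w) h0).1
    rw [h] at this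
    simpa using this
  · intro hp
    have h0 : (0 : Int) ≤ PySem.Chars.find t w := by
      rw [PySem.Chars.find_nonneg_iff]
      exact hp.isInfix
    rcases PySem.Chars.find_spec (s := t) (sub := w) h0 with ⟨_, hmin⟩
    by_contra hne
    have hpos : 0 < (PySem.Chars.find t w).toNat := by omega
    have := hmin 0 hpos
    simp at this
    exact this hp

-- one step of the DP equals A's inner loop, given that acc holds A's values for the shorter suffixes
theorem loop_eq (bank : List String) (c : Char) (rest : List Char)
    (acc : List (List (List String)))
    (hT : ∀ j, j ≤ rest.length → acc[j]? = some (allConstructA bank (rest.drop j))) :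
    ∀ words : List String, "" ∉ words →
      words.flatMap (fun w =>
        if w.toList.isPrefixOf (c :: rest) then
          match acc[w.toList.length - 1]? with
          | some r => r.map (fun rst => w :: rst)
          | none => []
        else []) = allConstructALoop bank words (c :: rest) := by
  intro words
  induction words with
  | nil => intro _; rw [allConstructALoop_nil]; rfl
  | cons w ws ih =>
    intro hne
    have hw : w ≠ "" := by intro h; exact hne (by simp [h])
    have hws : "" ∉ ws := fun h => hne (List.mem_cons_of_mem _ h)
    have hwl : w.toList ≠ [] := by
      intro h
      exact hw (by rwa [← String.toList_eq_nil_iff])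
    rw [List.flatMap_cons, ih hws, allConstructALoop_cons]
    congr 1
    by_cases hp : w.toList.isPrefixOf (c :: rest)
    · have hpre : w.toList <+: (c :: rest) := by rwa [← List.isPrefixOf_iff_prefix]
      have hfind : PySem.Chars.find (c :: rest) w.toList = 0 := (find_eq_zero_iff _ _).2 hpre
      have hlen : 0 < w.toList.length := List.length_pos_iff.2 hwl
      have hle : w.toList.length ≤ rest.length + 1 := by
        simpa using hpre.length_le
      have hdec : ((c :: rest).drop w.toList.length).length < (c :: rest).length := by
        simp only [List.length_drop, List.length_cons]; omega
      rw [hp, if_pos hfind, dif_pos hdec]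
      have hj : w.toList.length - 1 ≤ rest.length := by omega
      rw [hT _ hj]
      have hdrop : (c :: rest).drop w.toList.length = rest.drop (w.toList.length - 1) := by
        conv_lhs => rw [show w.toList.length = (w.toList.length - 1) + 1 from by omega]
        rw [List.drop_succ_cons]
      rw [hdrop]
      simp
    · have hfind : PySem.Chars.find (c :: rest) w.toList ≠ 0 := by
        rw [Ne, find_eq_zero_iff]
        intro hpre
        exact hp (List.isPrefixOf_iff_prefix.2 hpre)
      rw [if_neg hp, if_neg hfind]

-- the DP table holds exactly A's values for every suffix
theorem tables_spec (bank : List String) (hbank : "" ∉ bank) :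
    ∀ t : List Char, ∀ j, j ≤ t.length →
      (bTables bank t)[j]? = some (allConstructA bank (t.drop j)) := by
  intro t
  induction t with
  | nil =>
    intro j hj
    have hj0 : j = 0 := by simpa using hj
    subst hj0
    simp [bTables, allConstructA_nil]
  | cons c rest ih =>
    intro j hj
    match j with
    | 0 =>
      simp only [bTables, List.getElem?_cons_zero, List.drop_zero, Option.some.injEq]
      rw [allConstructA_cons, ← loop_eq bank c rest (bTables bank rest) ih bank hbank]
      rfl
    | j + 1 =>
      simp only [bTables, List.getElem?_cons_succ, List.drop_succ_cons]
      exact ih j (by simpa using hj)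

-- ===== VERDICT (by name: the statement is the Claim_ definition above) =====
theorem all_construct_spec : Claim_equal_all_construct := by
  intro target word_bank _ hpre
  unfold Spec_all_construct all_construct all_construct_alt
  rcases hpre with h | h
  · subst h
    simp [bTables, allConstructA_nil]
  · have hget := tables_spec word_bank h target.toList 0 (Nat.zero_le _)
    simp only [List.drop_zero] at hget
    cases hb : bTables word_bank target.toList with
    | nil => rw [hb] at hget; simp at hget
    | cons x xs =>
      rw [hb] at hget
      simp only [List.getElem?_cons_zero, Option.some.injEq] at hget
      simp [hget]
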